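-- pv_equiv track=rewrite | github.com/keuwey/Python_projects | cfop_alg_python2.py | reverter_algoritmo
-- ===== SOURCE A (Python) =====
-- def reverter_algoritmo(algoritmo):
--     algoritmo_revertido = ''
--     letras_com_aspas = ['R', 'L', 'U', 'D', 'F', 'B']
--
--     i = len(algoritmo) - 1
--     while i >= 0:
--         letra = algoritmo[i]
--
--         if letra in letras_com_aspas:
--             if i - 1 >= 0 and algoritmo[i - 1] == "'":
--                 algoritmo_revertido += letra
--                 i -= 2
--             else:
--                 algoritmo_revertido += letra + "'"
--                 i -= 1
--         else:
--             algoritmo_revertido += letra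
--             i -= 1
--
--     return algoritmo_revertido[::-1]
-- ===== SOURCE B (Python) =====
-- def reverter_algoritmo(algoritmo):
--     moves = "RLUDFB"
--     out = []
--     i = 0
--     n = len(algoritmo)
--     while i < n:
--         c = algoritmo[i]
--         if c == "'" and i + 1 < n and algoritmo[i + 1] in moves:
--             out.append(algoritmo[i + 1])
--             i += 2
--         elif c in moves:
--             out.append("'" + c)
--             i += 1
--         else:
--             out.append(c)
--             i += 1
--     return ''.join(out)
-- ===== Notes on version B (the rewrite author's own statement) =====
-- stated objective: simpler
-- what changed: Replaced A's backward right-to-left index scan with trailing string reversal by a single forward left-to-right pass with one-character lookahead that toggles the leading prime ('X -> X, X -> 'X), collecting pieces in a list joined once instead of repeated string concatenation.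
import Mathlib
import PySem

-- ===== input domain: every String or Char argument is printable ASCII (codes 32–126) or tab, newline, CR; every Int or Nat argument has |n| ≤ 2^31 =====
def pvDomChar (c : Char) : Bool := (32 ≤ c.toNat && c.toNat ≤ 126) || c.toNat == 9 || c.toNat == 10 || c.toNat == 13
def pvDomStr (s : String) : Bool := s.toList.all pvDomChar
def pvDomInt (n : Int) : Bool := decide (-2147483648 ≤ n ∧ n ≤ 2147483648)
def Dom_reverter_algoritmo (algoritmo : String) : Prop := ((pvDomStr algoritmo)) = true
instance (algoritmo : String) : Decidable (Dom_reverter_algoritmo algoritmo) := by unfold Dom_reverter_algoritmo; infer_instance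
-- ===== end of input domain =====

-- B replaces A's backward index scan plus final string reversal by a single forward
-- left-to-right pass with one-character lookahead (objective: simpler).

-- ===== PORT A =====
-- A's move-letter list letras_com_aspas
def pvMoves : List Char := ['R', 'L', 'U', 'D', 'F', 'B']

-- A's while loop: the Nat argument stands for Python's i + 1 (0 ⟺ i < 0); acc is
-- algoritmo_revertido as a char list, extended at the end exactly like Python's +=.
-- cs.getD n ' ' is algoritmo[i]; i is always in range when reached, so the default is inert.
def pvALoop (cs : List Char) : Nat → List Char → List Char
  | 0, acc => acc
  | n + 1, acc =>
    let letra := cs.getD n ' '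
    if letra ∈ pvMoves then
      if 1 ≤ n ∧ cs.getD (n - 1) ' ' = '\'' then
        pvALoop cs (n - 1) (acc ++ [letra])            -- i -= 2
      else
        pvALoop cs n (acc ++ [letra, '\''])            -- += letra + "'" ; i -= 1
    else
      pvALoop cs n (acc ++ [letra])                    -- i -= 1

def reverter_algoritmo (algoritmo : String) : String :=
  String.ofList ((pvALoop algoritmo.toList algoritmo.toList.length []).reverse)   -- [::-1]

-- ===== PORT B =====
-- B's forward pass: "'" + move letter → the letter; bare move letter → "'" + letter;
-- any other character verbatim.
def pvBGo : List Char → List Char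
  | [] => []
  | [c] => if c ∈ pvMoves then ['\'', c] else [c]
  | c :: d :: rest =>
    if c = '\'' ∧ d ∈ pvMoves then d :: pvBGo rest
    else if c ∈ pvMoves then '\'' :: c :: pvBGo (d :: rest)
    else c :: pvBGo (d :: rest)

def reverter_algoritmo_alt (algoritmo : String) : String :=
  String.ofList (pvBGo algoritmo.toList)

-- ===== PRECONDITION & SPEC =====
def Spec_reverter_algoritmo (algoritmo : String) (out : String) : Prop := out = reverter_algoritmo_alt algoritmo
instance (algoritmo : String) (out : String) : Decidable (Spec_reverter_algoritmo algoritmo out) := by unfold Spec_reverter_algoritmo; infer_instance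

-- ===== CLAIM (what is proved, stated in full; the proofs are below) =====
def Claim_equal_reverter_algoritmo : Prop := ∀ (algoritmo : String), Dom_reverter_algoritmo algoritmo → Spec_reverter_algoritmo algoritmo (reverter_algoritmo algoritmo)

-- ===== LEMMAS AND PROOFS =====

-- accumulator-free form of A's loop (proof helper)
def pvAPure (cs : List Char) : Nat → List Char
  | 0 => []
  | n + 1 =>
    let letra := cs.getD n ' '
    if letra ∈ pvMoves then
      if 1 ≤ n ∧ cs.getD (n - 1) ' ' = '\'' then letra :: pvAPure cs (n - 1)
      else letra :: '\'' :: pvAPure cs n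
    else letra :: pvAPure cs n

lemma pvALoop_acc (cs : List Char) (n : Nat) :
    ∀ acc, pvALoop cs n acc = acc ++ pvAPure cs n := by
  induction n using Nat.strong_induction_on with
  | _ n ih =>
    intro acc
    match n with
    | 0 => simp [pvALoop, pvAPure]
    | n + 1 =>
      simp only [pvALoop, pvAPure]
      split_ifs with h1 h2
      · rw [ih (n - 1) (by omega)]; simp
      · rw [ih n (by omega)]; simp
      · rw [ih n (by omega)]; simp

lemma pvMoves_no_quote : '\'' ∉ pvMoves := by decide

lemma pvBGo_snoc_nonmove (c : Char) (hc : c ∉ pvMoves) :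
    ∀ l, pvBGo (l ++ [c]) = pvBGo l ++ [c] := by
  intro l
  induction l using pvBGo.induct with
  | case1 => simp [pvBGo, hc]
  | case2 d hd =>
    have h1 : ¬ (d = '\'' ∧ c ∈ pvMoves) := fun h => hc h.2
    simp [pvBGo, hd, h1]
    exact hc
  | case3 d hd =>
    have h1 : ¬ (d = '\'' ∧ c ∈ pvMoves) := fun h => hc h.2
    simp [pvBGo, hd, h1]
    exact hc
  | case4 a d rest h1 ih =>
    simp only [List.cons_append, pvBGo, if_pos h1, ih]
  | case5 a d rest h1 h2 ih =>
    simp only [List.cons_append, pvBGo, if_neg h1, if_pos h2]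
    simpa using ih
  | case6 a d rest h1 h2 ih =>
    simp only [List.cons_append, pvBGo, if_neg h1, if_neg h2]
    simpa using ih

lemma pvBGo_snoc_pair (c : Char) (hc : c ∈ pvMoves) :
    ∀ l, pvBGo (l ++ ['\'', c]) = pvBGo l ++ [c] := by
  intro l
  induction l using pvBGo.induct with
  | case1 => simp [pvBGo, hc]
  | case2 d hd =>
    have h1 : ¬ (d = '\'' ∧ '\'' ∈ pvMoves) := fun h => pvMoves_no_quote h.2
    simp [pvBGo, hd, h1, hc]
  | case3 d hd =>
    by_cases hq : d = '\''
    · subst hq; simp [pvBGo, hc, pvMoves_no_quote]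
    · have h1 : ¬ (d = '\'' ∧ '\'' ∈ pvMoves) := fun h => pvMoves_no_quote h.2
      simp [pvBGo, hd, hc, hq]
  | case4 a d rest h1 ih =>
    simp only [List.cons_append, pvBGo, if_pos h1, ih]
  | case5 a d rest h1 h2 ih =>
    simp only [List.cons_append, pvBGo, if_neg h1, if_pos h2]
    simpa using ih
  | case6 a d rest h1 h2 ih =>
    simp only [List.cons_append, pvBGo, if_neg h1, if_neg h2]
    simpa using ih

lemma pvBGo_snoc_move (c : Char) (hc : c ∈ pvMoves) :
    ∀ l, l.getLast? ≠ some '\'' → pvBGo (l ++ [c]) = pvBGo l ++ ['\'', c] := by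
  intro l
  induction l using pvBGo.induct with
  | case1 => intro _; simp [pvBGo, hc]
  | case2 d hd =>
    intro hlast
    have hq : d ≠ '\'' := by simpa using hlast
    simp [pvBGo, hd, hq, hc]
  | case3 d hd =>
    intro hlast
    have hq : d ≠ '\'' := by simpa using hlast
    simp [pvBGo, hd, hq, hc]
  | case4 a d rest h1 ih =>
    intro hlast
    have hrest : rest.getLast? ≠ some '\'' := by
      cases rest with
      | nil => intro h; cases h
      | cons x xs =>
        intro h
        apply hlast
        rw [List.getLast?_cons_cons, List.getLast?_cons_cons]
        exact h
    simp only [List.cons_append, pvBGo, if_pos h1, ih hrest]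
  | case5 a d rest h1 h2 ih =>
    intro hlast
    have hdr : (d :: rest).getLast? ≠ some '\'' := by
      intro h; apply hlast; rw [List.getLast?_cons_cons]; exact h
    simp only [List.cons_append, pvBGo, if_neg h1, if_pos h2]
    simpa using ih hdr
  | case6 a d rest h1 h2 ih =>
    intro hlast
    have hdr : (d :: rest).getLast? ≠ some '\'' := by
      intro h; apply hlast; rw [List.getLast?_cons_cons]; exact h
    simp only [List.cons_append, pvBGo, if_neg h1, if_neg h2]
    simpa using ih hdr

lemma pvMain (cs : List Char) :
    ∀ n, n ≤ cs.length → pvBGo (cs.take n) = (pvAPure cs n).reverse := by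
  intro n
  induction n using Nat.strong_induction_on with
  | _ n ih =>
    intro hn
    match n with
    | 0 => simp [pvAPure, pvBGo]
    | n + 1 =>
      have hlt : n < cs.length := by omega
      have hget : cs.getD n ' ' = cs[n] := by
        simp [List.getD, List.getElem?_eq_getElem hlt]
      have htake : cs.take (n + 1) = cs.take n ++ [cs[n]] := by
        rw [List.take_add_one, List.getElem?_eq_getElem hlt]
        rfl
      have e1 : pvAPure cs (n + 1) =
          (if cs[n] ∈ pvMoves then
            (if 1 ≤ n ∧ cs.getD (n - 1) ' ' = '\'' then cs[n] :: pvAPure cs (n - 1)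
             else cs[n] :: '\'' :: pvAPure cs n)
           else cs[n] :: pvAPure cs n) := by
        simp only [pvAPure, hget]
      rw [e1]
      by_cases h1 : cs[n] ∈ pvMoves
      · rw [if_pos h1]
        by_cases h2 : 1 ≤ n ∧ cs.getD (n - 1) ' ' = '\''
        · rw [if_pos h2]
          obtain ⟨hn1, hprev⟩ := h2
          have hlt' : n - 1 < cs.length := by omega
          have hprev' : cs[n - 1] = '\'' := by
            rw [List.getD, List.getElem?_eq_getElem hlt'] at hprev
            simpa using hprev
          have htake' : cs.take n = cs.take (n - 1) ++ ['\''] := by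
            have h := List.take_add_one (i := n - 1) (l := cs)
            rw [List.getElem?_eq_getElem hlt', hprev'] at h
            have hne : (n - 1) + 1 = n := by omega
            rw [hne] at h
            simpa using h
          rw [htake, htake', List.append_assoc]
          show pvBGo (cs.take (n - 1) ++ ['\'', cs[n]]) = _
          rw [pvBGo_snoc_pair _ h1, ih (n - 1) (by omega) (by omega)]
          rw [List.reverse_cons]
        · rw [if_neg h2]
          have hlast : (cs.take n).getLast? ≠ some '\'' := by
            rcases Nat.eq_zero_or_pos n with h0 | hpos
            · subst h0; simp
            · have hlt' : n - 1 < cs.length := by omega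
              have hL : (cs.take n).getLast? = some cs[n - 1] := by
                rw [List.getLast?_eq_getElem?]
                have hlen : (cs.take n).length = n := by
                  simp [Nat.le_of_lt hlt]
                rw [hlen, List.getElem?_take, if_pos (by omega : n - 1 < n), List.getElem?_eq_getElem hlt']
              rw [hL]
              intro hcon
              apply h2
              refine ⟨by omega, ?_⟩
              rw [List.getD, List.getElem?_eq_getElem hlt']
              simpa using hcon
          rw [htake, pvBGo_snoc_move _ h1 _ hlast, ih n (by omega) (by omega)]
          simp
      · rw [if_neg h1]
        rw [htake, pvBGo_snoc_nonmove _ h1, ih n (by omega) (by omega)]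
        rw [List.reverse_cons]

-- ===== VERDICT (by name: the statement is the Claim_ definition above) =====
theorem reverter_algoritmo_spec : Claim_equal_reverter_algoritmo := by
  intro algoritmo _
  unfold Spec_reverter_algoritmo reverter_algoritmo reverter_algoritmo_alt
  rw [pvALoop_acc, List.nil_append,
    ← pvMain algoritmo.toList algoritmo.toList.length le_rfl, List.take_length]
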